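-- pv_equiv track=rewrite | github.com/Nasl0123/pocket-wikix | generadorALNAP.py | ordenar_info
-- ===== SOURCE A (Python) =====
-- def ordenar_info(info):
--     info = info[1:]
--     resultado = {}
--     for i,e in enumerate(info):
--         if 'tarjeta' in e.lower() or 'credito diferido' in e.lower():
--             resultado[e] = []
--             for x in info[i+1:]:
--                 if 'tarjeta' in x.lower() or 'credito diferido' in x.lower():
--                     break
--                 else:
--                     resultado[e].append(x)
--     return resultado
-- ===== SOURCE B (Python) =====
-- def ordenar_info(info):
--     resultado = {}
--     actual = None
--     for line in info[1:]:
--         low = line.lower()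
--         if 'tarjeta' in low or 'credito diferido' in low:
--             actual = line
--             resultado[line] = []
--         elif actual is not None:
--             resultado[actual].append(line)
--     return resultado
-- ===== Notes on version B (the rewrite author's own statement) =====
-- stated objective: simpler
-- what changed: Replaces A's nested rescans (for each header, re-scan the suffix until the next header) with a single pass that tracks the current header and appends each line as it is seen.
import Mathlib
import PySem

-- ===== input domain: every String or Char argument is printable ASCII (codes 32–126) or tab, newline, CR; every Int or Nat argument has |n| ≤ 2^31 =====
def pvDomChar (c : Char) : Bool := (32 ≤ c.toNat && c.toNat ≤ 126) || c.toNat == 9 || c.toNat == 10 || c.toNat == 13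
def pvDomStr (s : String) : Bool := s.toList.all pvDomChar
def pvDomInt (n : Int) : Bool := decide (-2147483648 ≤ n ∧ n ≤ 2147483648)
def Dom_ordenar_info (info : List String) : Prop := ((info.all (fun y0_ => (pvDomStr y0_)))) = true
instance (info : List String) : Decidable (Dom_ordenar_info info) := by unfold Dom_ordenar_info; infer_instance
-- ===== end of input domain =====

-- B replaces A's per-header rescan of the suffix with a single pass tracking the current header (simpler decomposition).

-- ===== PORT A =====
-- "'tarjeta' in e.lower() or 'credito diferido' in e.lower()" (same expression occurs verbatim in both Pythons)
def pvHdr (e : String) : Bool :=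
  PySem.Str.isIn "tarjeta" (PySem.Str.lower e) || PySem.Str.isIn "credito diferido" (PySem.Str.lower e)

-- A's inner "for x in info[i+1:] … break/append"; resultado[e].append(x) with e always present = modify e [] (· ++ [x])
def pvInnerA (e : String) : List String → PySem.Dict String (List String) → PySem.Dict String (List String)
  | [], d => d
  | x :: xs, d => if pvHdr x then d else pvInnerA e xs (d.modify e [] (· ++ [x]))

-- Python rebinds info = info[1:]; the rebound list is written out at both of its uses
def ordenar_info (info : List String) : List (String × List String) :=
  ((PySem.List.enumerate (PySem.List.slice info (some 1))).foldl
    (fun d (p : Int × String) =>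
      if pvHdr p.2 then
        pvInnerA p.2 (PySem.List.slice (PySem.List.slice info (some 1)) (some (p.1 + 1)))
          (d.insert p.2 [])
      else d)
    PySem.Dict.empty).items

-- ===== PORT B =====
def pvStepB (st : PySem.Dict String (List String) × Option String) (line : String) :
    PySem.Dict String (List String) × Option String :=
  if pvHdr line then (st.1.insert line [], some line)
  else match st.2 with
    | some a => (st.1.modify a [] (· ++ [line]), some a)
    | none => st

def ordenar_info_alt (info : List String) : List (String × List String) :=
  (((PySem.List.slice info (some 1)).foldl pvStepB (PySem.Dict.empty, none)).1).items

-- ===== PRECONDITION & SPEC =====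
def Spec_ordenar_info (info : List String) (out : List (String × List String)) : Prop := out = ordenar_info_alt info
instance (info : List String) (out : List (String × List String)) : Decidable (Spec_ordenar_info info out) := by unfold Spec_ordenar_info; infer_instance

-- ===== CLAIM (what is proved, stated in full; the proofs are below) =====
def Claim_equal_ordenar_info : Prop := ∀ (info : List String), Dom_ordenar_info info → Spec_ordenar_info info (ordenar_info info)

-- ===== LEMMAS AND PROOFS =====

-- Structural form of A's outer loop (proof-side characterization)
def pvALoop : List String → PySem.Dict String (List String) → PySem.Dict String (List String)
  | [], d => d
  | e :: rest, d =>
    if pvHdr e then pvALoop rest (pvInnerA e rest (d.insert e [])) else pvALoop rest d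

-- A's enumerate+slice fold equals the structural loop
theorem pvA_enum_eq (full : List String) : ∀ (l : List String) (k : Nat)
    (d : PySem.Dict String (List String)), full.drop k = l →
    (PySem.List.enumerate l (k : Int)).foldl
      (fun d (p : Int × String) =>
        if pvHdr p.2 then pvInnerA p.2 (PySem.List.slice full (some (p.1 + 1))) (d.insert p.2 [])
        else d) d = pvALoop l d := by
  intro l
  induction l with
  | nil => intro k d _; simp [PySem.List.enumerate_nil, pvALoop]
  | cons x xs ih =>
    intro k d h
    have hdrop : full.drop (k + 1) = xs := by
      rw [← List.drop_drop (i := 1) (j := k), h]; rfl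
    have hslice : PySem.List.slice full (some ((k : Int) + 1)) = xs := by
      rw [PySem.List.slice_from (xs := full) (a := (k : Int) + 1) (by omega)]
      have ht : ((k : Int) + 1).toNat = k + 1 := by omega
      rw [ht]; exact hdrop
    have hcast : (k : Int) + 1 = ((k + 1 : Nat) : Int) := by push_cast; ring
    rw [PySem.List.enumerate_cons, List.foldl_cons]
    by_cases hx : pvHdr x
    · rw [if_pos hx, hslice, hcast, ih (k + 1) _ hdrop]
      simp [pvALoop, hx]
    · rw [if_neg (by simp [hx]), hcast, ih (k + 1) _ hdrop]
      simp [pvALoop, hx]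

-- B's fold with a current header e equals A's loop after the pending inner collection at e
theorem pvB_some_eq : ∀ (rest : List String) (d : PySem.Dict String (List String)) (e : String),
    (rest.foldl pvStepB (d, some e)).1 = pvALoop rest (pvInnerA e rest d) := by
  intro rest
  induction rest with
  | nil => intro d e; simp [pvALoop, pvInnerA]
  | cons x xs ih =>
    intro d e
    by_cases hx : pvHdr x
    · simp only [List.foldl_cons, pvStepB, hx, if_pos, pvInnerA, pvALoop]
      exact ih _ _
    · simp only [List.foldl_cons, pvStepB, hx, Bool.false_eq_true, if_neg, not_false_iff,
        pvInnerA, pvALoop]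
      exact ih _ _

-- B's fold with no current header equals A's loop
theorem pvB_none_eq : ∀ (l : List String) (d : PySem.Dict String (List String)),
    (l.foldl pvStepB (d, none)).1 = pvALoop l d := by
  intro l
  induction l with
  | nil => intro d; simp [pvALoop]
  | cons x xs ih =>
    intro d
    by_cases hx : pvHdr x
    · simp only [List.foldl_cons, pvStepB, hx, if_pos, pvALoop]
      exact pvB_some_eq _ _ _
    · simp only [List.foldl_cons, pvStepB, hx, Bool.false_eq_true, if_neg, not_false_iff, pvALoop]
      exact ih _

-- ===== VERDICT (by name: the statement is the Claim_ definition above) =====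
theorem ordenar_info_spec : Claim_equal_ordenar_info := by
  intro info _
  unfold Spec_ordenar_info ordenar_info ordenar_info_alt
  rw [pvB_none_eq]
  have h0 : ((0 : Nat) : Int) = 0 := rfl
  rw [← h0, pvA_enum_eq (PySem.List.slice info (some 1))
      (PySem.List.slice info (some 1)) 0 PySem.Dict.empty (by simp)]
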